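-- pv_equiv track=rewrite | github.com/zlaakfh/See_Drive | DT2_coco_transform.py | extract_polygon_dicts
-- ===== SOURCE A (Python) =====
-- def extract_polygon_dicts(seg):
--     """
--     segmentation 안에서 [{x,y},{x,y}...] 형태의 polygon만 추출하여 리스트로 반환.
--     new_seg(flat list) 변환은 기존 코드에서 처리한다.
--     """
--     polygons = []
--
--     def traverse(item):
--         # polygon 형태는 dict 리스트
--         if isinstance(item, list) and len(item) > 0 and isinstance(item[0], dict):
--             polygons.append(item)
--
--         # 리스트 안에 리스트가 더 있으면 계속 탐색
--         elif isinstance(item, list):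
--             for elem in item:
--                 traverse(elem)
--
--     traverse(seg)
--     return polygons  # [{x,y},{x,y}...] 형태로 추출
-- ===== SOURCE B (Python) =====
-- def extract_polygon_dicts(seg):
--     """
--     segmentation 안에서 [{x,y},{x,y}...] 형태의 polygon만 추출하여 리스트로 반환.
--     Iterative version: explicit stack instead of a recursive helper.
--     """
--     polygons = []
--     stack = [seg]
--     while stack:
--         item = stack.pop()
--         if isinstance(item, list) and len(item) > 0 and isinstance(item[0], dict):
--             polygons.append(item)
--         elif isinstance(item, list):
--             # push children reversed so they are processed left-to-right
--             stack.extend(reversed(item))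
--     return polygons
-- ===== Notes on version B (the rewrite author's own statement) =====
-- stated objective: alternative
-- what changed: The recursive closure-over-accumulator helper is replaced by an explicit stack loop (pop; match a dict-list; otherwise push children reversed), removing recursion entirely.
import Mathlib
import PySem

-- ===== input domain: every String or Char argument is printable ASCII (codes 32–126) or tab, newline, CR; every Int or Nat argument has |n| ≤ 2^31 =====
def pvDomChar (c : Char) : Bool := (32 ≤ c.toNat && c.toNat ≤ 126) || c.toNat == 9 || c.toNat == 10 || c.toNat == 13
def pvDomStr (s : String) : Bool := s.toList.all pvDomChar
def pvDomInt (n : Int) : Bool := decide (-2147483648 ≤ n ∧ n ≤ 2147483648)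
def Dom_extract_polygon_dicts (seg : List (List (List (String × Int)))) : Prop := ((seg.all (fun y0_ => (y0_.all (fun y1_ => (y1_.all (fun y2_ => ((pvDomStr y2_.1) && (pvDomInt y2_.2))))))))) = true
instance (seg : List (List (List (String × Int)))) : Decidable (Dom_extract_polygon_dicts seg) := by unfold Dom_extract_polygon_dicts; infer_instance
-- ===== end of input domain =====

-- B replaces A's recursive helper with an explicit stack loop (alternative decomposition; same cost).
-- Input type fixes the nesting depth: seg is a list of polygons (each a list of dicts), so the Python
-- isinstance checks resolve statically per level; comments mark each resolved check.

-- ===== PORT A =====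
-- traverse(elem) where elem is a dict (String×Int assoc list): isinstance(elem, list) is False → body does nothing
def pvTravDict (polygons : List (List (List (String × Int)))) (_d : List (String × Int)) :
    List (List (List (String × Int))) := polygons

-- traverse(item) where item is a polygon: it is a list, and item[0] (when it exists) is a dict,
-- so the first branch is exactly 'len(item) > 0'; the elif loops traverse over its dict elements
def pvTravPoly (polygons : List (List (List (String × Int)))) (item : List (List (String × Int))) :
    List (List (List (String × Int))) :=
  if item.length > 0 then polygons ++ [item] else item.foldl pvTravDict polygons

-- traverse(seg): seg is a list whose first element (if any) is a list, never a dict,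
-- so the first branch is False and the elif loops traverse over the elements
def extract_polygon_dicts (seg : List (List (List (String × Int)))) : List (List (List (String × Int))) :=
  seg.foldl pvTravPoly []

-- ===== PORT B =====
-- A stack cell is either the whole seg (depth 2) or a polygon (depth 1); in Python the one list
-- 'stack' holds both, here a sum type keeps the port typed. Head of the list = top of the stack.
inductive pvStackItem : Type
  | root : List (List (List (String × Int))) → pvStackItem
  | poly : List (List (String × Int)) → pvStackItem

-- while stack: item = stack.pop(); …  — 'stack.extend(reversed(item))' with pop-from-end puts
-- item's children on top left-to-right, i.e. 'children ++ rest' in the head-is-top encoding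
def pvLoop : List pvStackItem → List (List (List (String × Int))) → List (List (List (String × Int)))
  | [], polygons => polygons
  | pvStackItem.poly p :: rest, polygons =>
      -- p is a list and p[0] (when it exists) is a dict → matched iff len(p) > 0;
      -- an empty p falls to the elif and pushes its zero children
      if p.length > 0 then pvLoop rest (polygons ++ [p]) else pvLoop rest polygons
  | pvStackItem.root s :: rest, polygons =>
      -- s's first element is a list, never a dict → elif: push children
      pvLoop (s.map pvStackItem.poly ++ rest) polygons
  termination_by items _ =>
    (items.map (fun i => match i with | pvStackItem.root s => s.length + 2 | pvStackItem.poly _ => 1)).sum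
  decreasing_by
  · simp
  · simp
  · simp [List.map_append, List.sum_append, Function.comp_def]

def extract_polygon_dicts_alt (seg : List (List (List (String × Int)))) : List (List (List (String × Int))) :=
  pvLoop [pvStackItem.root seg] []

-- ===== PRECONDITION & SPEC =====
def Spec_extract_polygon_dicts (seg : List (List (List (String × Int)))) (out : List (List (List (String × Int)))) : Prop := out = extract_polygon_dicts_alt seg
instance (seg : List (List (List (String × Int)))) (out : List (List (List (String × Int)))) : Decidable (Spec_extract_polygon_dicts seg out) := by unfold Spec_extract_polygon_dicts; infer_instance

-- ===== CLAIM (what is proved, stated in full; the proofs are below) =====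
def Claim_equal_extract_polygon_dicts : Prop := ∀ (seg : List (List (List (String × Int)))), Dom_extract_polygon_dicts seg → Spec_extract_polygon_dicts seg (extract_polygon_dicts seg)

-- ===== LEMMAS AND PROOFS =====

theorem pvTravDict_foldl (l : List (List (String × Int))) (polygons : List (List (List (String × Int)))) :
    l.foldl pvTravDict polygons = polygons := by
  induction l with
  | nil => rfl
  | cons d t ih => simpa [pvTravDict] using ih

theorem extract_fold (l : List (List (List (String × Int)))) (polygons : List (List (List (String × Int)))) :
    l.foldl pvTravPoly polygons = polygons ++ l.filter (fun p => decide (p.length > 0)) := by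
  induction l generalizing polygons with
  | nil => simp
  | cons p t ih =>
      simp only [List.foldl_cons, pvTravPoly, List.filter_cons]
      by_cases h : p.length > 0 <;> simp [h, ih, pvTravDict_foldl]

theorem pvLoop_push (s : List (List (List (String × Int)))) (rest : List pvStackItem)
    (polygons : List (List (List (String × Int)))) :
    pvLoop (s.map pvStackItem.poly ++ rest) polygons =
      pvLoop rest (polygons ++ s.filter (fun p => decide (p.length > 0))) := by
  induction s generalizing polygons with
  | nil => simp
  | cons p t ih =>
      simp only [List.map_cons, List.cons_append, pvLoop, List.filter_cons]
      by_cases h : p.length > 0 <;> simp [h, ih]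

-- ===== VERDICT (by name: the statement is the Claim_ definition above) =====
theorem extract_polygon_dicts_spec : Claim_equal_extract_polygon_dicts := by
  intro seg _
  unfold Spec_extract_polygon_dicts extract_polygon_dicts extract_polygon_dicts_alt
  rw [extract_fold]
  have h := pvLoop_push seg [] []
  simp only [List.append_nil] at h
  simp [pvLoop, h]
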